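-- pv_equiv track=rewrite | github.com/greb/aoc2021 | days/day2.py | part1
-- ===== SOURCE A (Python) =====
-- def part1(commands):
--     x,y = 0, 0
--
--     for direction, val in commands:
--         if direction == 'forward':
--             x += val
--         elif direction == 'down':
--             y += val
--         elif direction == 'up':
--             y -= val
--
--     return x*y
-- ===== SOURCE B (Python) =====
-- def part1(commands):
--     commands = list(commands)
--     x = sum(v for d, v in commands if d == 'forward')
--     y = sum(v for d, v in commands if d == 'down') - sum(v for d, v in commands if d == 'up')
--     return x * y
-- ===== Notes on version B (the rewrite author's own statement) =====
-- stated objective: simpler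
-- what changed: Replaces the single interleaved accumulating loop over two state variables with three independent filtered sums (one pass per direction), combined arithmetically at the end.
import Mathlib
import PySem

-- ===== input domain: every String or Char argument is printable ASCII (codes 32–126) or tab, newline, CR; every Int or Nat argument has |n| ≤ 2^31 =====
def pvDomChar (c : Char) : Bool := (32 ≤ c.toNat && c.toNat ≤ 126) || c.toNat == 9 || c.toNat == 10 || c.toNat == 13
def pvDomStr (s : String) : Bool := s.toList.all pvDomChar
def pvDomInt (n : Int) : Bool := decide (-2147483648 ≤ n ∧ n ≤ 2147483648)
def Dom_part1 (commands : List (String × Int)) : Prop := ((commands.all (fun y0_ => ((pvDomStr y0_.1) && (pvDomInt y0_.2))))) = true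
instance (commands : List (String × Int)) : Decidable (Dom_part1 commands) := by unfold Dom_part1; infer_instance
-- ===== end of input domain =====

-- B computes the same product via three filtered sums instead of one interleaved loop (objective: simpler).

-- ===== PORT A =====
-- literal port of A's single loop over state (x, y); the loop body is named for the proof
def part1Step (st : Int × Int) (dv : String × Int) : Int × Int :=
  let (x, y) := st
  let (direction, val) := dv
  if direction == "forward" then (x + val, y)
  else if direction == "down" then (x, y + val)
  else if direction == "up" then (x, y - val)
  else (x, y)

def part1 (commands : List (String × Int)) : Int :=
  let st := commands.foldl part1Step (0, 0)
  st.1 * st.2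

-- ===== PORT B =====
-- port of B: three independent filtered sums
def part1_alt (commands : List (String × Int)) : Int :=
  let x := ((commands.filter (fun dv => dv.1 == "forward")).map (·.2)).sum
  let y := ((commands.filter (fun dv => dv.1 == "down")).map (·.2)).sum
          - ((commands.filter (fun dv => dv.1 == "up")).map (·.2)).sum
  x * y

-- ===== PRECONDITION & SPEC =====
def Spec_part1 (commands : List (String × Int)) (out : Int) : Prop := out = part1_alt commands
instance (commands : List (String × Int)) (out : Int) : Decidable (Spec_part1 commands out) := by unfold Spec_part1; infer_instance

-- ===== CLAIM (what is proved, stated in full; the proofs are below) =====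
def Claim_equal_part1 : Prop := ∀ (commands : List (String × Int)), Dom_part1 commands → Spec_part1 commands (part1 commands)

-- ===== LEMMAS AND PROOFS =====

-- the fold starting from any state (a, b) equals (a + forward-sum, b + down-sum − up-sum)
theorem part1_fold_char (commands : List (String × Int)) (a b : Int) :
    commands.foldl part1Step (a, b)
    = (a + ((commands.filter (fun dv => dv.1 == "forward")).map (·.2)).sum,
       b + ((commands.filter (fun dv => dv.1 == "down")).map (·.2)).sum
         - ((commands.filter (fun dv => dv.1 == "up")).map (·.2)).sum) := by
  induction commands generalizing a b with
  | nil => simp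
  | cons hd tl ih =>
    obtain ⟨d, v⟩ := hd
    rw [List.foldl_cons, ih]
    by_cases h1 : d = "forward"
    · simp [part1Step, h1, List.filter_cons]; ring_nf
    · by_cases h2 : d = "down"
      · simp [part1Step, h1, h2, List.filter_cons]; ring_nf
      · by_cases h3 : d = "up"
        · simp [part1Step, h1, h2, h3, List.filter_cons]; ring_nf
        · simp [part1Step, h1, h2, h3, List.filter_cons]

-- ===== VERDICT (by name: the statement is the Claim_ definition above) =====
theorem part1_spec : Claim_equal_part1 := by
  intro commands _
  unfold Spec_part1 part1 part1_alt
  rw [part1_fold_char]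
  simp
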